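-- pv_equiv track=rewrite | github.com/unlimitediw/LCContest | Contest100.py | subarrayBitwiseORsSlow
-- ===== SOURCE A (Python) =====
-- def subarrayBitwiseORsSlow(A):
--     """
--     :type A: List[int]
--     :rtype: int
--     """
--     dic = {}
--     def bitSum(curA):
--         q = 0
--         for elem in curA:
--             q|= elem
--         return q
--     def checkSub(start):
--         if start == len(A):
--             return set()
--         cur = set()
--         for i in range(start + 1,len(A) + 1):
--             if str(A[start:i]) not in dic:
--                 cur.add(bitSum(A[start:i]))
--         cur = cur.union(checkSub(start+1))
--         return cur
--     return len(checkSub(0))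
-- ===== SOURCE B (Python) =====
-- def subarrayBitwiseORsSlow(A):
--     """
--     :type A: List[int]
--     :rtype: int
--     """
--     ans = set()
--     prev = set()
--     for x in A:
--         prev = {x} | {p | x for p in prev}
--         ans |= prev
--     return len(ans)
-- ===== Notes on version B (the rewrite author's own statement) =====
-- stated objective: faster
-- what changed: Replaced the recursive enumeration of all subarrays (re-ORing each slice from scratch, with a dead always-empty dict lookup) by the classical single pass that maintains the set of OR values of subarrays ending at the current index.
import Mathlib
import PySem

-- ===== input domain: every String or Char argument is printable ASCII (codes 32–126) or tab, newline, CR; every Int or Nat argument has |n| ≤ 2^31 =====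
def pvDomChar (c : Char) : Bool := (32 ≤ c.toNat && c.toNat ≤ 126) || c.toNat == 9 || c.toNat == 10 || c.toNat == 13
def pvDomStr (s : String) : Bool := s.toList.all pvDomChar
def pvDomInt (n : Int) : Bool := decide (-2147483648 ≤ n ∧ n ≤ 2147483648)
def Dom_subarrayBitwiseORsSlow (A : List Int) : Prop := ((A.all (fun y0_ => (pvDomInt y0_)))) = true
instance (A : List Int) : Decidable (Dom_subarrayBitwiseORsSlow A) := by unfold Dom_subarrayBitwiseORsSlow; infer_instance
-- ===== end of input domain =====

-- B replaces A's recursive re-enumeration of every subarray by one left-to-right pass maintaining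
-- the set of OR values of subarrays ending at the current element (objective: faster).

-- ===== PORT A =====
-- str(list-of-ints) as Python prints it, e.g. "[1, 2]" — the (always-missing) key of the empty dict
def pyStrIntList (xs : List Int) : String :=
  "[" ++ String.intercalate ", " (xs.map PySem.Int.toStr) ++ "]"

def bitSum (curA : List Int) : Int :=
  curA.foldl (fun q elem => PySem.Int.bor q elem) 0

-- the fuel argument only makes Python's recursion total; the entry call passes fuel = A.length,
-- and A.length ≤ start + fuel holds at every recursive call, so fuel is never exhausted
def checkSub (A : List Int) (dic : PySem.Dict String Int) (fuel start : Nat) : PySem.Set Int :=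
  if start = A.length then PySem.Set.empty
  else
    let cur := (PySem.List.pyRange ((start : Int) + 1) ((A.length : Int) + 1) 1).foldl
      (fun cur i =>
        if (dic.get? (pyStrIntList (PySem.List.slice A (some (start : Int)) (some i)))) = none
        then cur.add (bitSum (PySem.List.slice A (some (start : Int)) (some i)))
        else cur) PySem.Set.empty
    match fuel with
    | 0 => PySem.Set.empty
    | f + 1 => PySem.Set.union cur (checkSub A dic f (start + 1))

def subarrayBitwiseORsSlow (A : List Int) : Int :=
  let dic : PySem.Dict String Int := PySem.Dict.empty
  PySem.Set.len (checkSub A dic A.length 0)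

-- ===== PORT B =====
def subarrayBitwiseORsSlow_alt (A : List Int) : Int :=
  let p := A.foldl
    (fun (acc : PySem.Set Int × PySem.Set Int) x =>
      let prev := PySem.Set.union (PySem.Set.ofList [x])
        (PySem.Set.ofList (acc.2.map (fun q => PySem.Int.bor q x)))
      (PySem.Set.union acc.1 prev, prev))
    (PySem.Set.empty, PySem.Set.empty)
  PySem.Set.len p.1

-- ===== PRECONDITION & SPEC =====
def Spec_subarrayBitwiseORsSlow (A : List Int) (out : Int) : Prop := out = subarrayBitwiseORsSlow_alt A
instance (A : List Int) (out : Int) : Decidable (Spec_subarrayBitwiseORsSlow A out) := by unfold Spec_subarrayBitwiseORsSlow; infer_instance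

-- ===== CLAIM (what is proved, stated in full; the proofs are below) =====
def Claim_equal_subarrayBitwiseORsSlow : Prop := ∀ (A : List Int), Dom_subarrayBitwiseORsSlow A → Spec_subarrayBitwiseORsSlow A (subarrayBitwiseORsSlow A)

-- ===== LEMMAS AND PROOFS =====

theorem bitSum_concat (l : List Int) (x : Int) :
    bitSum (l ++ [x]) = PySem.Int.bor (bitSum l) x := by
  simp [bitSum, List.foldl_append]

theorem bitSum_singleton (x : Int) : bitSum [x] = x := by
  simp [bitSum, PySem.Int.bor_comm 0 x]

-- A's result characterized: the OR of every nonempty subarray starting at an index ≥ start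
theorem mem_checkSub (A : List Int) (fuel start : Nat) (v : Int)
    (hs : start ≤ A.length) (hf : A.length ≤ start + fuel) :
    v ∈ checkSub A PySem.Dict.empty fuel start ↔
      ∃ s l : Nat, start ≤ s ∧ 0 < l ∧ s + l ≤ A.length ∧ v = bitSum ((A.drop s).take l) := by
  induction fuel generalizing start with
  | zero =>
    have h : start = A.length := le_antisymm hs (by omega)
    unfold checkSub; rw [if_pos h]
    simp only [PySem.Set.empty, List.not_mem_nil, false_iff]
    rintro ⟨s, l, h1, h2, h3, _⟩; omega
  | succ f ih =>
    unfold checkSub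
    by_cases h : start = A.length
    · rw [if_pos h]
      simp only [PySem.Set.empty, List.not_mem_nil, false_iff]
      rintro ⟨s, l, h1, h2, h3, _⟩; omega
    · rw [if_neg h]
      have hlt : start < A.length := lt_of_le_of_ne hs h
      have hg : ∀ k, (PySem.Dict.empty : PySem.Dict String Int).get? k = none := fun _ => rfl
      simp only [hg, if_true]
      rw [← PySem.Set.update_map_eq_foldl_add]
      rw [PySem.Set.mem_union, PySem.Set.mem_update,
        ih (start + 1) (by omega) (by omega)]
      simp only [PySem.Set.empty, List.not_mem_nil, false_or, List.mem_map,
        PySem.List.mem_pyRange_one]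
      constructor
      · rintro (⟨i, ⟨hi1, hi2⟩, hv⟩ | ⟨s, l, h1, h2, h3, hv⟩)
        · refine ⟨start, i.toNat - start, le_refl _, by omega, by omega, ?_⟩
          rw [← hv, PySem.List.slice_toNat A (by omega) (by omega)]
          simp
        · exact ⟨s, l, by omega, h2, h3, hv⟩
      · rintro ⟨s, l, h1, h2, h3, hv⟩
        rcases Nat.eq_or_lt_of_le h1 with rfl | hgt
        · left
          refine ⟨(start : Int) + l, ⟨by omega, by omega⟩, ?_⟩
          rw [PySem.List.slice_toNat A (by omega) (by omega), hv]
          simp only [Int.toNat_natCast]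
          congr 2
          omega
        · right; exact ⟨s, l, by omega, h2, h3, hv⟩

theorem nodup_checkSub (A : List Int) (fuel start : Nat) :
    (checkSub A PySem.Dict.empty fuel start).Nodup := by
  induction fuel generalizing start with
  | zero =>
    unfold checkSub; split
    · simp [PySem.Set.empty]
    · simp [PySem.Set.empty]
  | succ f ih =>
    unfold checkSub; split
    · simp [PySem.Set.empty]
    · have hg : ∀ k, (PySem.Dict.empty : PySem.Dict String Int).get? k = none := fun _ => rfl
      simp only [hg, if_true]
      rw [← PySem.Set.update_map_eq_foldl_add]
      exact PySem.Set.nodup_union _ _ (PySem.Set.nodup_update _ _ (List.nodup_nil))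

-- the body of B's fold, named for the proofs (definitionally the lambda in subarrayBitwiseORsSlow_alt)
def altStep (acc : PySem.Set Int × PySem.Set Int) (x : Int) : PySem.Set Int × PySem.Set Int :=
  let prev := PySem.Set.union (PySem.Set.ofList [x])
    (PySem.Set.ofList (acc.2.map (fun q => PySem.Int.bor q x)))
  (PySem.Set.union acc.1 prev, prev)

-- B's loop invariant: second component = ORs of the nonempty suffixes, first = of all nonempty subarrays
theorem alt_inv (A : List Int) :
    ((A.foldl altStep (PySem.Set.empty, PySem.Set.empty)).1.Nodup ∧
     (A.foldl altStep (PySem.Set.empty, PySem.Set.empty)).2.Nodup) ∧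
    (∀ v, v ∈ (A.foldl altStep (PySem.Set.empty, PySem.Set.empty)).2 ↔
        ∃ s : Nat, s < A.length ∧ v = bitSum (A.drop s)) ∧
    (∀ v, v ∈ (A.foldl altStep (PySem.Set.empty, PySem.Set.empty)).1 ↔
        ∃ s l : Nat, 0 < l ∧ s + l ≤ A.length ∧ v = bitSum ((A.drop s).take l)) := by
  induction A using List.reverseRecOn with
  | nil => simp [PySem.Set.empty]
  | append_singleton pre x ih =>
    obtain ⟨⟨hn1, hn2⟩, hmem2, hmem1⟩ := ih
    rw [List.foldl_append]
    simp only [List.foldl_cons, List.foldl_nil]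
    have hdrop : ∀ s : Nat, s ≤ pre.length → (pre ++ [x]).drop s = pre.drop s ++ [x] := by
      intro s hsle
      rw [List.drop_append_of_le_length hsle]
    have hmem2' : ∀ v, v ∈ (altStep (pre.foldl altStep (PySem.Set.empty, PySem.Set.empty)) x).2 ↔
        ∃ s : Nat, s < (pre ++ [x]).length ∧ v = bitSum ((pre ++ [x]).drop s) := by
      intro v
      unfold altStep
      simp only [PySem.Set.mem_union, PySem.Set.mem_ofList, List.mem_singleton,
        List.mem_map, List.length_append, List.length_singleton]
      constructor
      · rintro (rfl | ⟨q, hq, rfl⟩)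
        · exact ⟨pre.length, by omega, by
            rw [hdrop pre.length le_rfl, List.drop_length, List.nil_append, bitSum_singleton]⟩
        · obtain ⟨s, hsl, rfl⟩ := (hmem2 q).mp hq
          exact ⟨s, by omega, by rw [hdrop s (by omega), bitSum_concat]⟩
      · rintro ⟨s, hsl, rfl⟩
        rcases Nat.lt_or_ge s pre.length with hlt | hge
        · right
          exact ⟨bitSum (pre.drop s), (hmem2 _).mpr ⟨s, hlt, rfl⟩,
            by rw [hdrop s (by omega), bitSum_concat]⟩
        · left
          have hse : s = pre.length := by omega
          rw [hse, hdrop pre.length le_rfl, List.drop_length, List.nil_append, bitSum_singleton]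
    refine ⟨⟨?_, ?_⟩, hmem2', ?_⟩
    · exact PySem.Set.nodup_union _ _ hn1
    · exact PySem.Set.nodup_union _ _ (PySem.Set.nodup_ofList _)
    · intro v
      have h2 := hmem2' v
      simp only [altStep] at h2
      show v ∈ PySem.Set.union _ _ ↔ _
      rw [PySem.Set.mem_union, hmem1 v, h2]
      constructor
      · rintro (⟨s, l, hl, hle, rfl⟩ | ⟨s, hsl, rfl⟩)
        · refine ⟨s, l, hl, by simp; omega, ?_⟩
          rw [hdrop s (by omega), List.take_append_of_le_length (by simp; omega)]
        · have hsl' : s ≤ pre.length := by simp at hsl; omega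
          refine ⟨s, pre.length + 1 - s, by omega,
            by simp only [List.length_append, List.length_singleton]; omega, ?_⟩
          rw [List.take_of_length_le (by simp)]
      · rintro ⟨s, l, hl, hle, rfl⟩
        simp only [List.length_append, List.length_singleton] at hle
        rcases Nat.lt_or_ge (s + l) (pre.length + 1) with hlt | hge
        · left
          refine ⟨s, l, hl, by omega, ?_⟩
          rw [hdrop s (by omega), List.take_append_of_le_length (by simp; omega)]
        · right
          refine ⟨s, by simp; omega, ?_⟩
          rw [List.take_of_length_le (by simp [List.length_drop]; omega)]

-- ===== VERDICT (by name: the statement is the Claim_ definition above) =====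
theorem subarrayBitwiseORsSlow_spec : Claim_equal_subarrayBitwiseORsSlow := by
  intro A _
  unfold Spec_subarrayBitwiseORsSlow subarrayBitwiseORsSlow
  have halt : subarrayBitwiseORsSlow_alt A
      = PySem.Set.len ((A.foldl altStep (PySem.Set.empty, PySem.Set.empty)).1) := rfl
  rw [halt]
  obtain ⟨⟨hn1, _⟩, _, hm1⟩ := alt_inv A
  have hperm : (checkSub A PySem.Dict.empty A.length 0).Perm
      ((A.foldl altStep (PySem.Set.empty, PySem.Set.empty)).1) := by
    rw [List.perm_ext_iff_of_nodup (nodup_checkSub A A.length 0) hn1]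
    intro v
    rw [mem_checkSub A A.length 0 v (Nat.zero_le _) (by omega), hm1 v]
    constructor
    · rintro ⟨s, l, _, hl, hle, hv⟩; exact ⟨s, l, hl, hle, hv⟩
    · rintro ⟨s, l, hl, hle, hv⟩; exact ⟨s, l, Nat.zero_le _, hl, hle, hv⟩
  simp [PySem.Set.len, hperm.length_eq]
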